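-- pv_equiv track=rewrite | github.com/Drachier/PyTreeNet | pytreenet/time_evolution/Lattice_simulation/util.py | get_checkerboard_pattern
-- ===== SOURCE A (Python) =====
-- def get_checkerboard_pattern(Lx, Ly):
--     black_sites = []
--     white_sites = []
--
--     for x in range(Lx):
--         for y in range(Ly):
--             current_site = f"({x},{y})"
--             if (x + y) % 2 == 0:
--                 black_sites.append(current_site)
--             else:
--                 white_sites.append(current_site)
--
--     # Output the sites in each category
--     return black_sites, white_sites
-- ===== SOURCE B (Python) =====
-- def get_checkerboard_pattern(Lx, Ly):
--     # Build each colour class directly with strided inner ranges: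
--     # (x+y) is even iff y has the same parity as x.
--     black_sites = [f"({x},{y})" for x in range(Lx) for y in range(x % 2, Ly, 2)]
--     white_sites = [f"({x},{y})" for x in range(Lx) for y in range(1 - x % 2, Ly, 2)]
--     return black_sites, white_sites
-- ===== Notes on version B (the rewrite author's own statement) =====
-- stated objective: alternative
-- what changed: Replaces the single branching double loop (testing (x+y)%2 on every site) with two branch-free passes that enumerate each colour class directly via strided ranges range(x%2, Ly, 2) and range(1-x%2, Ly, 2).
import Mathlib
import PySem

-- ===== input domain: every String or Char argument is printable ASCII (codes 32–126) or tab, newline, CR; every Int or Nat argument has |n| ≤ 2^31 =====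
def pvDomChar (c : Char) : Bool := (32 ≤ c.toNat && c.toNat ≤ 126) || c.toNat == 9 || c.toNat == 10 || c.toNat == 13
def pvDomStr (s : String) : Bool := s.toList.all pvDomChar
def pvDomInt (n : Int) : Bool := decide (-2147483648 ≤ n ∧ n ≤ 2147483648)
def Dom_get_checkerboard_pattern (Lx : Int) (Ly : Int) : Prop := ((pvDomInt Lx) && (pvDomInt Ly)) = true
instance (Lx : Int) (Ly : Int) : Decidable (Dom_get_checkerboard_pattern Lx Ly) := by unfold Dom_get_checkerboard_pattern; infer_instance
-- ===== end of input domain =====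

-- B replaces A's single branching double loop with two branch-free passes using
-- strided inner ranges (same cost, different decomposition); proved equal on all inputs.


-- ===== PORT A =====
-- f"({x},{y})"
def pvFmt (x y : Int) : String := "(" ++ PySem.Int.toStr x ++ "," ++ PySem.Int.toStr y ++ ")"

def get_checkerboard_pattern (Lx : Int) (Ly : Int) : List String × List String :=
  (PySem.List.pyRange 0 Lx 1).foldl
    (fun bw x =>
      (PySem.List.pyRange 0 Ly 1).foldl
        (fun bw y =>
          if PySem.Int.mod (x + y) 2 = 0 then (bw.1 ++ [pvFmt x y], bw.2)
          else (bw.1, bw.2 ++ [pvFmt x y]))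
        bw)
    ([], [])

-- ===== PORT B =====
def get_checkerboard_pattern_alt (Lx : Int) (Ly : Int) : List String × List String :=
  ((PySem.List.pyRange 0 Lx 1).flatMap
      (fun x => (PySem.List.pyRange (PySem.Int.mod x 2) Ly 2).map (fun y => pvFmt x y)),
   (PySem.List.pyRange 0 Lx 1).flatMap
      (fun x => (PySem.List.pyRange (1 - PySem.Int.mod x 2) Ly 2).map (fun y => pvFmt x y)))

-- ===== PRECONDITION & SPEC =====
def Spec_get_checkerboard_pattern (Lx : Int) (Ly : Int) (out : List String × List String) : Prop := out = get_checkerboard_pattern_alt Lx Ly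
instance (Lx : Int) (Ly : Int) (out : List String × List String) : Decidable (Spec_get_checkerboard_pattern Lx Ly out) := by unfold Spec_get_checkerboard_pattern; infer_instance

-- ===== CLAIM (what is proved, stated in full; the proofs are below) =====
def Claim_equal_get_checkerboard_pattern : Prop := ∀ (Lx : Int) (Ly : Int), Dom_get_checkerboard_pattern Lx Ly → Spec_get_checkerboard_pattern Lx Ly (get_checkerboard_pattern Lx Ly)

-- ===== LEMMAS AND PROOFS =====

theorem pvMod2_eq (a : Int) : PySem.Int.mod a 2 = a % 2 := by
  simp [PySem.Int.mod, Int.fmod_eq_emod]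

-- an empty strided range
theorem pvRange2_nil (s Ly : Int) (_hs : 0 ≤ s) (h : Ly ≤ s) :
    PySem.List.pyRange s Ly 2 = [] := by
  rw [PySem.List.pyRange_of_pos _ _ (by norm_num : (0:Int) < 2)]
  rw [if_neg (by omega)]
  simp

-- appending the next row element to a stride-2 range
theorem pvRange2_succ (s : Int) (hs : s = 0 ∨ s = 1) (n : Nat) :
    PySem.List.pyRange s ((n : Int) + 1) 2 =
      if (n : Int) % 2 = s then PySem.List.pyRange s (n : Int) 2 ++ [(n : Int)]
      else PySem.List.pyRange s (n : Int) 2 := by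
  rw [PySem.List.pyRange_of_pos _ _ (by norm_num : (0:Int) < 2),
      PySem.List.pyRange_of_pos _ _ (by norm_num : (0:Int) < 2)]
  by_cases hpar : (n : Int) % 2 = s
  · rw [if_pos hpar]
    have hslt : s < (n : Int) + 1 := by omega
    rw [if_pos hslt]
    by_cases hn : s < (n : Int)
    · rw [if_pos hn]
      have hc : (((n : Int) + 1 - s + 2 - 1) / 2).toNat
          = (((n : Int) - s + 2 - 1) / 2).toNat + 1 := by omega
      rw [hc, List.range_succ, List.map_append]
      congr 1
      simp only [List.map_cons, List.map_nil]
      congr 1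
      omega
    · rw [if_neg hn]
      have hs' : s = (n : Int) := by omega
      have hc : (((n : Int) + 1 - s + 2 - 1) / 2).toNat = 1 := by omega
      rw [hc]
      simp [List.range_succ, hs']
  · rw [if_neg hpar]
    by_cases hn : s < (n : Int)
    · rw [if_pos (by omega), if_pos hn]
      congr 2
      omega
    · rw [if_neg (by omega)]
      rw [if_neg hn]

-- the inner y-loop of A produces exactly B's two strided rows
theorem pvInner (x : Int) (n : Nat) (b w : List String) :
    (PySem.List.pyRange 0 (n : Int) 1).foldl
      (fun bw y =>
        if PySem.Int.mod (x + y) 2 = 0 then (bw.1 ++ [pvFmt x y], bw.2)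
        else (bw.1, bw.2 ++ [pvFmt x y])) (b, w)
    = (b ++ (PySem.List.pyRange (x % 2) (n : Int) 2).map (fun y => pvFmt x y),
       w ++ (PySem.List.pyRange (1 - x % 2) (n : Int) 2).map (fun y => pvFmt x y)) := by
  induction n generalizing b w with
  | zero =>
      rw [PySem.List.pyRange_one_eq_nil (by norm_num),
          pvRange2_nil _ _ (by omega) (by omega),
          pvRange2_nil _ _ (by omega) (by omega)]
      simp
  | succ m ih =>
      have hcast : ((m + 1 : Nat) : Int) = (m : Int) + 1 := by push_cast; ring
      rw [hcast, PySem.List.pyRange_one_succ_right (by omega), List.foldl_append, ih]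
      simp only [List.foldl_cons, List.foldl_nil]
      rw [pvMod2_eq]
      by_cases hpar : (m : Int) % 2 = x % 2
      · rw [if_pos (by omega)]
        rw [pvRange2_succ (x % 2) (by omega) m, if_pos hpar]
        rw [pvRange2_succ (1 - x % 2) (by omega) m, if_neg (by omega)]
        simp
      · rw [if_neg (by omega)]
        rw [pvRange2_succ (x % 2) (by omega) m, if_neg hpar]
        rw [pvRange2_succ (1 - x % 2) (by omega) m, if_pos (by omega)]
        simp

-- inner loop, stated for an arbitrary integer bound Ly
theorem pvInner' (x Ly : Int) (b w : List String) :
    (PySem.List.pyRange 0 Ly 1).foldl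
      (fun bw y =>
        if PySem.Int.mod (x + y) 2 = 0 then (bw.1 ++ [pvFmt x y], bw.2)
        else (bw.1, bw.2 ++ [pvFmt x y])) (b, w)
    = (b ++ (PySem.List.pyRange (PySem.Int.mod x 2) Ly 2).map (fun y => pvFmt x y),
       w ++ (PySem.List.pyRange (1 - PySem.Int.mod x 2) Ly 2).map (fun y => pvFmt x y)) := by
  rw [pvMod2_eq]
  rcases le_or_gt Ly 0 with hLy | hLy
  · rw [PySem.List.pyRange_one_eq_nil hLy,
        pvRange2_nil _ _ (by omega) (by omega),
        pvRange2_nil _ _ (by omega) (by omega)]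
    simp
  · obtain ⟨n, hn⟩ : ∃ n : Nat, Ly = (n : Int) := ⟨Ly.toNat, by omega⟩
    subst hn
    exact pvInner x n b w

-- the outer x-loop accumulates B's flatMaps
theorem pvOuter (Ly : Int) (m : Nat) (b w : List String) :
    (PySem.List.pyRange 0 (m : Int) 1).foldl
      (fun bw x =>
        (PySem.List.pyRange 0 Ly 1).foldl
          (fun bw y =>
            if PySem.Int.mod (x + y) 2 = 0 then (bw.1 ++ [pvFmt x y], bw.2)
            else (bw.1, bw.2 ++ [pvFmt x y])) bw) (b, w)
    = (b ++ (PySem.List.pyRange 0 (m : Int) 1).flatMap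
          (fun x => (PySem.List.pyRange (PySem.Int.mod x 2) Ly 2).map (fun y => pvFmt x y)),
       w ++ (PySem.List.pyRange 0 (m : Int) 1).flatMap
          (fun x => (PySem.List.pyRange (1 - PySem.Int.mod x 2) Ly 2).map (fun y => pvFmt x y))) := by
  induction m generalizing b w with
  | zero =>
      rw [PySem.List.pyRange_one_eq_nil (a := 0) (b := ((0 : Nat) : Int)) (by norm_num)]
      simp
  | succ k ih =>
      have hcast : ((k + 1 : Nat) : Int) = (k : Int) + 1 := by push_cast; ring
      rw [hcast, PySem.List.pyRange_one_succ_right (by omega), List.foldl_append, ih]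
      simp only [List.foldl_cons, List.foldl_nil, List.flatMap_append, List.flatMap_cons,
        List.flatMap_nil, List.append_nil]
      rw [pvInner' (k : Int) Ly]
      simp [List.append_assoc]

-- ===== VERDICT (by name: the statement is the Claim_ definition above) =====
theorem get_checkerboard_pattern_spec : Claim_equal_get_checkerboard_pattern := by
  intro Lx Ly _
  unfold Spec_get_checkerboard_pattern get_checkerboard_pattern get_checkerboard_pattern_alt
  rcases le_or_gt Lx 0 with hLx | hLx
  · rw [PySem.List.pyRange_one_eq_nil hLx]
    simp
  · obtain ⟨m, hm⟩ : ∃ m : Nat, Lx = (m : Int) := ⟨Lx.toNat, by omega⟩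
    subst hm
    rw [pvOuter Ly m [] []]
    simp
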